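-- pv_equiv track=rewrite | github.com/eogbadu/Simplified-Minesweeper | proj3.py | checkGameComplete
-- ===== SOURCE A (Python) =====
-- FLAG               = "F"
--
-- MINE               = "*"
--
-- def checkGameComplete(board, prettyBoard, numMines):
--     isComplete = True
--
--     # if there are any mines left, then  the game is not over
--     if numMines != 0:
--         isComplete = False
--
--     for i in range(len(board)):
--         for j in range(len(board)):
--
--             # if the two boards mine and flag location do not match
--             # then the game is not over
--             if prettyBoard[i][j] == FLAG:
--                 if board[i][j] != MINE:
--                     isComplete = False
--             elif board[i][j] == MINE:
--                 if prettyBoard[i][j] != FLAG: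
--                     isComplete = False
--
--     return isComplete
-- ===== SOURCE B (Python) =====
-- FLAG = "F"
-- MINE = "*"
--
-- def checkGameComplete(board, prettyBoard, numMines):
--     n = len(board)
--     flags = []
--     mines = []
--     for i in range(n):
--         for j in range(n):
--             if prettyBoard[i][j] == FLAG:
--                 flags.append((i, j))
--             if board[i][j] == MINE:
--                 mines.append((i, j))
--     return numMines == 0 and flags == mines
-- ===== Notes on version B (the rewrite author's own statement) =====
-- stated objective: simpler
-- what changed: Instead of accumulating a boolean through nested per-cell conditionals, B collects the coordinate list of flagged cells and the coordinate list of mined cells in one sweep and returns numMines == 0 and flags == mines.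
import Mathlib
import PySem

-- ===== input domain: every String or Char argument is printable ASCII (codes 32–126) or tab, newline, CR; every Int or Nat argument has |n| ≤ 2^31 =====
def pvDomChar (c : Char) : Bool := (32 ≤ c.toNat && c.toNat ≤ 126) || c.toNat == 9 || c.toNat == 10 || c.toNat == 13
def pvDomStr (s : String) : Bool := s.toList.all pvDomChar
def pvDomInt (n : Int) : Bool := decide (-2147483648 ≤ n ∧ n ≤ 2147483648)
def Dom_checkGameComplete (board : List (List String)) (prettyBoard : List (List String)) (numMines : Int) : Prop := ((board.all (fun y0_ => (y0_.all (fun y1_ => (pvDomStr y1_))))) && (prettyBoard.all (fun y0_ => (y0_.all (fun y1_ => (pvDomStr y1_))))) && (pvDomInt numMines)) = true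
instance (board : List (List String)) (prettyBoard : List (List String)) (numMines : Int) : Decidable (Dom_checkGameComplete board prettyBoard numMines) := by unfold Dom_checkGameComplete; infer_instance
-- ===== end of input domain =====

-- B replaces A's per-cell boolean accumulation by collecting the coordinate lists of
-- flagged cells and of mined cells and comparing them (simpler decomposition, same cost).

-- shared indexing helper: xs[i][j]; the getD defaults are only reached outside Pre_ (IndexError in Python)
def pvCell (xs : List (List String)) (i j : Int) : String :=
  (PySem.List.pyGet? ((PySem.List.pyGet? xs i).getD []) j).getD ""

-- ===== PORT A =====
def checkGameComplete (board : List (List String)) (prettyBoard : List (List String)) (numMines : Int) : Bool :=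
  let isComplete := true
  let isComplete := if numMines ≠ 0 then false else isComplete
  (PySem.List.pyRange 0 (board.length : Int) 1).foldl (fun acc i =>
    (PySem.List.pyRange 0 (board.length : Int) 1).foldl (fun acc j =>
      if pvCell prettyBoard i j == "F" then
        (if pvCell board i j != "*" then false else acc)
      else if pvCell board i j == "*" then
        (if pvCell prettyBoard i j != "F" then false else acc)
      else acc) acc) isComplete

-- ===== PORT B =====
def checkGameComplete_alt (board : List (List String)) (prettyBoard : List (List String)) (numMines : Int) : Bool :=
  let n : Int := (board.length : Int)
  let fm := (PySem.List.pyRange 0 n 1).foldl (fun s i =>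
    (PySem.List.pyRange 0 n 1).foldl (fun (s : List (Int × Int) × List (Int × Int)) j =>
      let s := if pvCell prettyBoard i j == "F" then (s.1 ++ [(i, j)], s.2) else s
      if pvCell board i j == "*" then (s.1, s.2 ++ [(i, j)]) else s) s)
    (([], []) : List (Int × Int) × List (Int × Int))
  decide (numMines = 0) && fm.1 == fm.2

-- ===== PRECONDITION & SPEC =====
-- Pre_ excludes exactly the ragged/short boards on which A raises IndexError
-- (cells board[i][j] / prettyBoard[i][j] for i,j < len(board) must exist); B raises there too.
def Pre_checkGameComplete (board : List (List String)) (prettyBoard : List (List String)) (numMines : Int) : Prop :=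
  board.length ≤ prettyBoard.length ∧
  (∀ r ∈ board, board.length ≤ r.length) ∧
  (∀ r ∈ prettyBoard.take board.length, board.length ≤ r.length)
instance (board : List (List String)) (prettyBoard : List (List String)) (numMines : Int) : Decidable (Pre_checkGameComplete board prettyBoard numMines) := by unfold Pre_checkGameComplete; infer_instance

def pvWitness_checkGameComplete : List (List String) × List (List String) × Int := ([["*"]], [["F"]], 0)

def Spec_checkGameComplete (board : List (List String)) (prettyBoard : List (List String)) (numMines : Int) (out : Bool) : Prop := out = checkGameComplete_alt board prettyBoard numMines
instance (board : List (List String)) (prettyBoard : List (List String)) (numMines : Int) (out : Bool) : Decidable (Spec_checkGameComplete board prettyBoard numMines out) := by unfold Spec_checkGameComplete; infer_instance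

-- ===== CLAIM (what is proved, stated in full; the proofs are below) =====
def Claim_equal_checkGameComplete : Prop := ∀ (board : List (List String)) (prettyBoard : List (List String)) (numMines : Int), Dom_checkGameComplete board prettyBoard numMines → Pre_checkGameComplete board prettyBoard numMines → Spec_checkGameComplete board prettyBoard numMines (checkGameComplete board prettyBoard numMines)

-- ===== LEMMAS AND PROOFS =====

-- A's per-cell "the flag/mine statuses agree" test
def pvGood (board prettyBoard : List (List String)) (i j : Int) : Bool :=
  (pvCell prettyBoard i j == "F") == (pvCell board i j == "*")

-- A's fold is an all-cells conjunction
theorem pvFoldA_eq_all (board prettyBoard : List (List String)) (l m : List Int) (acc : Bool) :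
    l.foldl (fun acc i =>
      m.foldl (fun acc j =>
        if pvCell prettyBoard i j == "F" then
          (if pvCell board i j != "*" then false else acc)
        else if pvCell board i j == "*" then
          (if pvCell prettyBoard i j != "F" then false else acc)
        else acc) acc) acc
    = (acc && l.all (fun i => m.all (fun j => pvGood board prettyBoard i j))) := by
  induction l generalizing acc with
  | nil => simp
  | cons i l ih =>
    have hrow : ∀ (acc : Bool),
        m.foldl (fun acc j =>
          if pvCell prettyBoard i j == "F" then
            (if pvCell board i j != "*" then false else acc)
          else if pvCell board i j == "*" then
            (if pvCell prettyBoard i j != "F" then false else acc)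
          else acc) acc = (acc && m.all (fun j => pvGood board prettyBoard i j)) := by
      clear ih
      induction m with
      | nil => simp
      | cons j m ihm =>
        intro acc
        simp only [List.foldl_cons, List.all_cons, ihm, pvGood]
        cases hF : (pvCell prettyBoard i j == "F") <;>
          cases hM : (pvCell board i j == "*") <;>
            simp [hF, hM, bne]
    simp only [List.foldl_cons, List.all_cons, ih, hrow, Bool.and_assoc]

-- B's fold collects the filtered coordinate lists
theorem pvFoldB_row (board prettyBoard : List (List String)) (i : Int) (m : List Int)
    (s : List (Int × Int) × List (Int × Int)) :
    m.foldl (fun (s : List (Int × Int) × List (Int × Int)) j =>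
      let s := if pvCell prettyBoard i j == "F" then (s.1 ++ [(i, j)], s.2) else s
      if pvCell board i j == "*" then (s.1, s.2 ++ [(i, j)]) else s) s
    = (s.1 ++ (m.map (fun j => (i, j))).filter (fun c => pvCell prettyBoard c.1 c.2 == "F"),
       s.2 ++ (m.map (fun j => (i, j))).filter (fun c => pvCell board c.1 c.2 == "*")) := by
  induction m generalizing s with
  | nil => simp
  | cons j m ihm =>
    simp only [List.foldl_cons, List.map_cons, List.filter_cons, ihm]
    cases hF : (pvCell prettyBoard i j == "F") <;>
      cases hM : (pvCell board i j == "*") <;>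
        simp

def pvCoords (l m : List Int) : List (Int × Int) :=
  l.flatMap (fun i => m.map (fun j => (i, j)))

theorem pvFoldB_eq_filter (board prettyBoard : List (List String)) (l m : List Int)
    (s : List (Int × Int) × List (Int × Int)) :
    l.foldl (fun s i =>
      m.foldl (fun (s : List (Int × Int) × List (Int × Int)) j =>
        let s := if pvCell prettyBoard i j == "F" then (s.1 ++ [(i, j)], s.2) else s
        if pvCell board i j == "*" then (s.1, s.2 ++ [(i, j)]) else s) s) s
    = (s.1 ++ (pvCoords l m).filter (fun c => pvCell prettyBoard c.1 c.2 == "F"),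
       s.2 ++ (pvCoords l m).filter (fun c => pvCell board c.1 c.2 == "*")) := by
  induction l generalizing s with
  | nil => simp [pvCoords]
  | cons i l ih =>
    rw [List.foldl_cons, pvFoldB_row, ih]
    simp [pvCoords, List.flatMap_cons, List.filter_append]

-- two filters of the same list are equal iff the predicates agree on its members
theorem pvFilter_eq_filter_iff {α : Type} (p q : α → Bool) (l : List α) :
    l.filter p = l.filter q ↔ ∀ x ∈ l, p x = q x := by
  induction l with
  | nil => simp
  | cons a l ih =>
    simp only [List.filter_cons, List.mem_cons, forall_eq_or_imp]
    cases hp : p a <;> cases hq : q a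
    · simp [ih]
    · simp only [Bool.false_eq_true, if_false, if_true, false_and, iff_false]
      intro h
      have ha : a ∈ List.filter p l := by rw [h]; simp
      have := (List.mem_filter.mp ha).2
      simp [hp] at this
    · simp only [Bool.true_eq_false, Bool.false_eq_true, if_false, if_true, false_and, iff_false]
      intro h
      have ha : a ∈ List.filter q l := by rw [← h]; simp
      have := (List.mem_filter.mp ha).2
      simp [hq] at this
    · simp [ih]

theorem pvAll_eq_filterEq (board prettyBoard : List (List String)) (l m : List Int) :
    (l.all (fun i => m.all (fun j => pvGood board prettyBoard i j)))
    = ((pvCoords l m).filter (fun c => pvCell prettyBoard c.1 c.2 == "F")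
        == (pvCoords l m).filter (fun c => pvCell board c.1 c.2 == "*")) := by
  rw [Bool.eq_iff_iff]
  simp only [List.all_eq_true, beq_iff_eq, pvGood, pvFilter_eq_filter_iff, pvCoords,
    List.mem_flatMap, List.mem_map]
  constructor
  · rintro h c ⟨i, hi, j, hj, rfl⟩
    exact h i hi j hj
  · intro h i hi j hj
    exact h (i, j) ⟨i, hi, j, hj, rfl⟩

-- ===== VERDICT (by name: the statement is the Claim_ definition above) =====
theorem checkGameComplete_spec : Claim_equal_checkGameComplete := by
  intro board prettyBoard numMines _ _
  unfold Spec_checkGameComplete checkGameComplete checkGameComplete_alt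
  simp only [pvFoldA_eq_all, pvFoldB_eq_filter, List.nil_append]
  rw [pvAll_eq_filterEq]
  by_cases h : numMines = 0 <;> simp [h]
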